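-- pv_equiv track=rewrite | github.com/MayankMaheshwar/DS-and-Algo-solving | leetcode/hashmap.py | solve
-- ===== SOURCE A (Python) =====
-- def solve(A, B, C):
--     Hash1, Hash2, Hash3 = set(A), set(B), set(C)
--     res = set()
--     for i in Hash1:
--         if i in Hash2 or i in Hash3:
--             res.add(i)
--     for j in Hash2:
--         if j in Hash3:
--             res.add(j)
--
--     return sorted(list(res))
-- ===== SOURCE B (Python) =====
-- def solve(A, B, C):
--     cnt = {}
--     for x in list(set(A)) + list(set(B)) + list(set(C)):
--         cnt[x] = cnt.get(x, 0) + 1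
--     return sorted(k for k, c in cnt.items() if c >= 2)
-- ===== Notes on version B (the rewrite author's own statement) =====
-- stated objective: alternative
-- what changed: Replaces A's two membership-test loops with pairwise disjunctions by one frequency table over the three deduplicated inputs, keeping the keys whose count reaches 2.
import Mathlib
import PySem

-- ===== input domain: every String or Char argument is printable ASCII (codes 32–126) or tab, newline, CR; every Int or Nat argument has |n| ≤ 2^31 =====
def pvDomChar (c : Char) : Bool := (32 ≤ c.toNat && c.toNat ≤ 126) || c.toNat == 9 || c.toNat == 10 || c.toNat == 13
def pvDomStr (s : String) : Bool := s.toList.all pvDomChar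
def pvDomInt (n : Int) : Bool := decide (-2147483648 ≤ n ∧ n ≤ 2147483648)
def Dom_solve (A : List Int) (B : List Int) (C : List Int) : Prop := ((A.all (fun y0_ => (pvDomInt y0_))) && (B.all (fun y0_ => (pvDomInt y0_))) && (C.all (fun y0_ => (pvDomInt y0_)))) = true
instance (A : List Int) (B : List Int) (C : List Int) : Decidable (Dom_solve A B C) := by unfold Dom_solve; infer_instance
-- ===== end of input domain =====

-- B builds one frequency table over the three deduplicated inputs and keeps keys with count ≥ 2,
-- instead of A's two loops with pairwise membership disjunctions. (objective: alternative)

-- ===== PORT A =====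
def solve (A : List Int) (B : List Int) (C : List Int) : List Int :=
  let hash1 : PySem.Set Int := PySem.Set.ofList A
  let hash2 : PySem.Set Int := PySem.Set.ofList B
  let hash3 : PySem.Set Int := PySem.Set.ofList C
  let res : PySem.Set Int :=
    hash1.foldl (fun res i =>
      if PySem.Set.contains hash2 i || PySem.Set.contains hash3 i then PySem.Set.add res i else res)
      PySem.Set.empty
  let res :=
    hash2.foldl (fun res j =>
      if PySem.Set.contains hash3 j then PySem.Set.add res j else res) res
  PySem.List.sorted res (fun x => x) false

-- ===== PORT B =====
def solve_alt (A : List Int) (B : List Int) (C : List Int) : List Int :=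
  let xs : List Int := PySem.Set.ofList A ++ PySem.Set.ofList B ++ PySem.Set.ofList C
  let cnt : PySem.Dict Int Int :=
    xs.foldl (fun d x => d.insert x (d.getD x 0 + 1)) PySem.Dict.empty
  PySem.List.sorted ((cnt.items.filter (fun p => decide (2 ≤ p.2))).map Prod.fst) (fun x => x) false

-- ===== PRECONDITION & SPEC =====
def Spec_solve (A : List Int) (B : List Int) (C : List Int) (out : List Int) : Prop := out = solve_alt A B C
instance (A : List Int) (B : List Int) (C : List Int) (out : List Int) : Decidable (Spec_solve A B C out) := by unfold Spec_solve; infer_instance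

-- ===== CLAIM (what is proved, stated in full; the proofs are below) =====
def Claim_equal_solve : Prop := ∀ (A : List Int) (B : List Int) (C : List Int), Dom_solve A B C → Spec_solve A B C (solve A B C)

-- ===== LEMMAS AND PROOFS =====

theorem count_nodup {l : List Int} (h : l.Nodup) (a : Int) :
    l.count a = if a ∈ l then 1 else 0 := by
  split
  · exact List.count_eq_one_of_mem h ‹_›
  · exact List.count_eq_zero.2 ‹_›

-- the unsorted lists the two ports sort are permutations of each other
theorem pre_sorted_perm (A B C : List Int) :
    (PySem.Set.update
        (PySem.Set.ofList ((PySem.Set.ofList A).filter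
          (fun i => PySem.Set.contains (PySem.Set.ofList B) i || PySem.Set.contains (PySem.Set.ofList C) i)))
        ((PySem.Set.ofList B).filter (fun j => PySem.Set.contains (PySem.Set.ofList C) j))).Perm
      ((((PySem.Set.ofList A ++ PySem.Set.ofList B ++ PySem.Set.ofList C).foldl
            (fun d x => d.insert x (d.getD x 0 + 1)) (PySem.Dict.empty : PySem.Dict Int Int)).items.filter
          (fun p => decide (2 ≤ p.2))).map Prod.fst) := by
  rw [PySem.Dict.foldl_insert_getD_add_one_eq_counter,
      PySem.Dict.items_counter, List.filter_map, List.map_map]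
  have hnodR : (((PySem.Set.ofList A ++ PySem.Set.ofList B ++ PySem.Set.ofList C) : List Int)
      |> PySem.Set.ofList).Nodup := PySem.Set.nodup_ofList _
  apply (List.perm_ext_iff_of_nodup ?_ ?_).2
  · intro x
    simp only [PySem.Set.mem_update, PySem.Set.mem_ofList, List.mem_filter, List.mem_map,
      Function.comp, PySem.Set.contains_eq_listContains, List.contains_eq_mem,
      Bool.or_eq_true, decide_eq_true_eq]
    constructor
    · rintro (⟨hA, hBC⟩ | ⟨hB, hC⟩)
      · refine ⟨x, ⟨?_, ?_⟩, rfl⟩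
        · simp [PySem.Set.mem_ofList, List.mem_append, hA]
        · rw [List.count_append, List.count_append,
            count_nodup (PySem.Set.nodup_ofList A), count_nodup (PySem.Set.nodup_ofList B),
            count_nodup (PySem.Set.nodup_ofList C)]
          simp only [PySem.Set.mem_ofList]
          rcases hBC with h | h <;> simp [hA, h] <;> split <;> omega
      · refine ⟨x, ⟨?_, ?_⟩, rfl⟩
        · simp [PySem.Set.mem_ofList, List.mem_append, hB]
        · rw [List.count_append, List.count_append,
            count_nodup (PySem.Set.nodup_ofList A), count_nodup (PySem.Set.nodup_ofList B),
            count_nodup (PySem.Set.nodup_ofList C)]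
          simp only [PySem.Set.mem_ofList]
          simp [hB, hC]; split <;> omega
    · rintro ⟨y, ⟨hy, hc⟩, rfl⟩
      rw [List.count_append, List.count_append,
        count_nodup (PySem.Set.nodup_ofList A), count_nodup (PySem.Set.nodup_ofList B),
        count_nodup (PySem.Set.nodup_ofList C)] at hc
      simp only [PySem.Set.mem_ofList] at *
      by_cases hA : y ∈ A <;> by_cases hB : y ∈ B <;> by_cases hC : y ∈ C <;>
        simp_all
  · exact PySem.Set.nodup_update _ _ (PySem.Set.nodup_ofList _)
  · exact (hnodR.filter _).map_on (by
      intro a ha b hb h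
      simpa using h)

-- A's two accumulation loops, written as set-updates of filtered lists
theorem solve_eval (A B C : List Int) :
    solve A B C =
      PySem.List.sorted
        (PySem.Set.update
          (PySem.Set.ofList ((PySem.Set.ofList A).filter
            (fun i => PySem.Set.contains (PySem.Set.ofList B) i || PySem.Set.contains (PySem.Set.ofList C) i)))
          ((PySem.Set.ofList B).filter (fun j => PySem.Set.contains (PySem.Set.ofList C) j)))
        (fun x => x) false := by
  simp only [solve, PySem.List.foldl_if_eq_foldl_filter]
  rfl

-- ===== VERDICT (by name: the statement is the Claim_ definition above) =====
theorem solve_spec : Claim_equal_solve := by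
  intro A B C _
  unfold Spec_solve solve_alt
  rw [solve_eval]
  exact (PySem.List.sorted_id_eq_sorted_id_iff_perm _ _).2 (pre_sorted_perm A B C)
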